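-- pv_equiv track=rewrite | github.com/shahsandesh30/agentic_rag_service | app/eval/metrics.py | retrieval_labels
-- ===== SOURCE A (Python) =====
-- def retrieval_labels(hits: list[dict], gold_rules: list[dict]) -> list[int]:
--     """Return binary relevance per hit using weak gold rules."""
--     labs = []
--     for h in hits:
--         ok = False
--         t = (h.get("text") or "").lower()
--         sec = (h.get("section") or "").lower()
--         path = (h.get("path") or "").lower()
--         cid = h.get("chunk_id")
--         for r in gold_rules:
--             if "chunk_id" in r and r["chunk_id"] == cid:
--                 ok = True
--             if "path_contains" in r and r["path_contains"].lower() in path: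
--                 ok = True
--             if "section_contains" in r and r["section_contains"].lower() in sec:
--                 ok = True
--             if "text_contains" in r and r["text_contains"].lower() in t:
--                 ok = True
--             if ok:
--                 break
--         labs.append(1 if ok else 0)
--     return labs
-- ===== SOURCE B (Python) =====
-- def retrieval_labels(hits: list[dict], gold_rules: list[dict]) -> list[int]:
--     """Return binary relevance per hit using weak gold rules."""
--     chunk_ids = [r["chunk_id"] for r in gold_rules if "chunk_id" in r]
--     path_pats = [r["path_contains"].lower() for r in gold_rules if "path_contains" in r]
--     sec_pats = [r["section_contains"].lower() for r in gold_rules if "section_contains" in r]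
--     text_pats = [r["text_contains"].lower() for r in gold_rules if "text_contains" in r]
--     labs = []
--     for h in hits:
--         t = (h.get("text") or "").lower()
--         sec = (h.get("section") or "").lower()
--         path = (h.get("path") or "").lower()
--         cid = h.get("chunk_id")
--         ok = (cid in chunk_ids
--               or any(p in path for p in path_pats)
--               or any(s in sec for s in sec_pats)
--               or any(x in t for x in text_pats))
--         labs.append(1 if ok else 0)
--     return labs
-- ===== Notes on version B (the rewrite author's own statement) =====
-- stated objective: idiomatic
-- what changed: B makes one pass over gold_rules to build four grouped pattern lists (chunk ids and lowercased path/section/text substrings, lowercased once), then labels each hit by membership/any-substring tests, replacing A's per-hit scan over all rules with break.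
import Mathlib
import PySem

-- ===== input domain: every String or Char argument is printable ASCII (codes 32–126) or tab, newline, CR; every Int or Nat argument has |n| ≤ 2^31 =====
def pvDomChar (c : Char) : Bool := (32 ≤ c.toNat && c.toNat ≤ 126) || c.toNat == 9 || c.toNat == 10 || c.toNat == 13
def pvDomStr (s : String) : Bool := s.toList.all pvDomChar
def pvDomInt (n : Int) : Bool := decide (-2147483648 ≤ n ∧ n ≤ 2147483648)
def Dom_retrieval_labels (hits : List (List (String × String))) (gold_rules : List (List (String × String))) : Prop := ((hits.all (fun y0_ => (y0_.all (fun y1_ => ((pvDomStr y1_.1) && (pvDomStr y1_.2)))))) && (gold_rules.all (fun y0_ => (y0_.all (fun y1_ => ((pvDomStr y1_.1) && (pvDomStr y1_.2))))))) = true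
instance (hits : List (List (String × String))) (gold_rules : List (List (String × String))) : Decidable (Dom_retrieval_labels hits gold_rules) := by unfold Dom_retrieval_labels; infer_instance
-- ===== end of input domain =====

-- B groups the gold rules into four pattern lists in one pass (lowercasing each rule string once),
-- then labels each hit by list membership / any-substring tests instead of A's per-hit scan-with-break.

-- dict lookup on an association list: first match (h.get(k))
def pvGet (d : List (String × String)) (k : String) : Option String :=
  (d.find? (fun kv => kv.1 == k)).map (fun kv => kv.2)

-- (h.get(k) or "")
def pvGetOr (d : List (String × String)) (k : String) : String :=
  match pvGet d k with
  | some v => v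
  | none => ""

-- ===== PORT A =====
-- the body of A's inner loop for one rule r: the four sequential `if … : ok = True`
def pvRuleHit (cid : Option String) (path sec t : String) (r : List (String × String)) : Bool :=
  (match pvGet r "chunk_id" with | some v => some v == cid | none => false)
  || (match pvGet r "path_contains" with | some v => PySem.Str.isIn (PySem.Str.lower v) path | none => false)
  || (match pvGet r "section_contains" with | some v => PySem.Str.isIn (PySem.Str.lower v) sec | none => false)
  || (match pvGet r "text_contains" with | some v => PySem.Str.isIn (PySem.Str.lower v) t | none => false)

-- A's inner `for r in gold_rules` with `if ok: break`
def pvALoop (cid : Option String) (path sec t : String) : List (List (String × String)) → Bool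
  | [] => false
  | r :: rs => if pvRuleHit cid path sec t r then true else pvALoop cid path sec t rs

def retrieval_labels (hits : List (List (String × String))) (gold_rules : List (List (String × String))) : List Int :=
  hits.foldl
    (fun labs h =>
      let t := PySem.Str.lower (pvGetOr h "text")
      let sec := PySem.Str.lower (pvGetOr h "section")
      let path := PySem.Str.lower (pvGetOr h "path")
      let cid := pvGet h "chunk_id"
      labs ++ [if pvALoop cid path sec t gold_rules then (1 : Int) else 0])
    []

-- ===== PORT B =====
def retrieval_labels_alt (hits : List (List (String × String))) (gold_rules : List (List (String × String))) : List Int :=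
  let chunkIds := gold_rules.filterMap (fun r => pvGet r "chunk_id")
  let pathPats := gold_rules.filterMap (fun r => (pvGet r "path_contains").map PySem.Str.lower)
  let secPats := gold_rules.filterMap (fun r => (pvGet r "section_contains").map PySem.Str.lower)
  let textPats := gold_rules.filterMap (fun r => (pvGet r "text_contains").map PySem.Str.lower)
  hits.map (fun h =>
    let t := PySem.Str.lower (pvGetOr h "text")
    let sec := PySem.Str.lower (pvGetOr h "section")
    let path := PySem.Str.lower (pvGetOr h "path")
    let cid := pvGet h "chunk_id"
    let ok := chunkIds.any (fun v => some v == cid)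
      || pathPats.any (fun p => PySem.Str.isIn p path)
      || secPats.any (fun p => PySem.Str.isIn p sec)
      || textPats.any (fun p => PySem.Str.isIn p t)
    if ok then (1 : Int) else 0)

-- ===== PRECONDITION & SPEC =====
def Spec_retrieval_labels (hits : List (List (String × String))) (gold_rules : List (List (String × String))) (out : List Int) : Prop := out = retrieval_labels_alt hits gold_rules
instance (hits : List (List (String × String))) (gold_rules : List (List (String × String))) (out : List Int) : Decidable (Spec_retrieval_labels hits gold_rules out) := by unfold Spec_retrieval_labels; infer_instance

-- ===== CLAIM (what is proved, stated in full; the proofs are below) =====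
def Claim_equal_retrieval_labels : Prop := ∀ (hits : List (List (String × String))) (gold_rules : List (List (String × String))), Dom_retrieval_labels hits gold_rules → Spec_retrieval_labels hits gold_rules (retrieval_labels hits gold_rules)

-- ===== LEMMAS AND PROOFS =====

-- pure Bool regrouping fact used in the cons step
theorem pv_bool_regroup (a b c d A B C D : Bool) :
    ((a || b || c || d) || (A || B || C || D)) = ((a || A) || (b || B) || (c || C) || (d || D)) := by
  revert a b c d A B C D; decide

-- A's scan-with-break over the rules equals B's four grouped any-tests
theorem pvALoop_eq_grouped (cid : Option String) (path sec t : String)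
    (gs : List (List (String × String))) :
    pvALoop cid path sec t gs =
      ((gs.filterMap (fun r => pvGet r "chunk_id")).any (fun v => some v == cid)
        || (gs.filterMap (fun r => (pvGet r "path_contains").map PySem.Str.lower)).any (fun p => PySem.Str.isIn p path)
        || (gs.filterMap (fun r => (pvGet r "section_contains").map PySem.Str.lower)).any (fun p => PySem.Str.isIn p sec)
        || (gs.filterMap (fun r => (pvGet r "text_contains").map PySem.Str.lower)).any (fun p => PySem.Str.isIn p t)) := by
  induction gs with
  | nil => rfl
  | cons r rs ih =>
    have hstep : pvALoop cid path sec t (r :: rs)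
        = (pvRuleHit cid path sec t r || pvALoop cid path sec t rs) := by
      by_cases h : pvRuleHit cid path sec t r = true <;> simp [pvALoop, h]
    rw [hstep, ih, pvRuleHit]
    cases h1 : pvGet r "chunk_id" <;> cases h2 : pvGet r "path_contains" <;>
      cases h3 : pvGet r "section_contains" <;> cases h4 : pvGet r "text_contains" <;>
      simp only [List.filterMap_cons, h1, h2, h3, h4, Option.map_some, Option.map_none,
        List.any_cons] <;>
      rw [pv_bool_regroup] <;> simp

-- ===== VERDICT (by name: the statement is the Claim_ definition above) =====
theorem retrieval_labels_spec : Claim_equal_retrieval_labels := by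
  intro hits gold_rules _dom
  unfold Spec_retrieval_labels retrieval_labels retrieval_labels_alt
  rw [PySem.List.foldl_append_singleton_eq_map]
  refine List.map_congr_left ?_
  intro h _
  simp only [pvALoop_eq_grouped]
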